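-- pv_equiv track=rewrite | github.com/vikasjangam0806/python_assignement_10 | Python_assignment_10.py | checkOrder
-- ===== SOURCE A (Python) =====
-- from collections import OrderedDict
-- from collections import OrderedDict
--
-- def checkOrder(input, pattern):
--
--     # create empty OrderedDict
--     # output will be like {'a': None,'b': None, 'c': None}
--     dict = OrderedDict.fromkeys(input)
--
--     # traverse generated OrderedDict parallel with
--     # pattern string to check if order of characters
--     # are same or not
--     ptrlen = 0
--     for key,value in dict.items():
--         if (key == pattern[ptrlen]):
--             ptrlen = ptrlen + 1
--
--         # check if we have traverse complete
--         # pattern string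
--         if (ptrlen == (len(pattern))):
--             return 'true'
--
--     # if we come out from for loop that means
--     # order was mismatched
--     return 'false'
-- ===== SOURCE B (Python) =====
-- def checkOrder(input, pattern):
--     # first-occurrence position of each distinct char of input
--     pos = {}
--     for i, c in enumerate(input):
--         if c not in pos:
--             pos[c] = i
--     last = -1
--     for c in pattern:
--         p = pos.get(c)
--         if p is None or p <= last:
--             return 'false'
--         last = p
--     return 'true'
-- ===== Notes on version B (the rewrite author's own statement) =====
-- stated objective: alternative
-- what changed: Instead of deduplicating the input and greedily advancing a pointer into the pattern while scanning the distinct characters, B builds a dict of each character's first-occurrence index in one pass and then walks the pattern checking that those indices are present and strictly increasing.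
-- intended difference: On input='' with pattern='' A returns 'false' (the loop over zero keys never runs) although the empty pattern is trivially in order; B returns the intended 'true'. — e.g. on checkOrder("", ""): A returns "false", B returns "true"
import Mathlib
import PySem

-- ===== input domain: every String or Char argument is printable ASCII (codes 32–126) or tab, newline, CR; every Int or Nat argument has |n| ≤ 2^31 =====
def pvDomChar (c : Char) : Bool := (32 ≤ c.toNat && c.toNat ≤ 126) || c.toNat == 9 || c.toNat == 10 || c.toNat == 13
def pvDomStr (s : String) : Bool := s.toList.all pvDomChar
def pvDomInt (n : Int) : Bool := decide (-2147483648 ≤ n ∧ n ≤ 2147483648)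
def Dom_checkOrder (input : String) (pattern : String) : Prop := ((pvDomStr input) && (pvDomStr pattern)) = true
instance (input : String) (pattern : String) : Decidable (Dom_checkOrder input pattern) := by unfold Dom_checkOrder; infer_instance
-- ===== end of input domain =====

-- B replaces A's walk over the distinct characters with a first-occurrence index map plus a
-- monotonicity walk over the pattern (objective: alternative decomposition, same asymptotic cost).

-- ===== PORT A =====
-- loop over dict.items() carrying ptrlen; 'pattern[ptrlen]' is PySem.List.pyGet? (none = IndexError,
-- where Python raises — those inputs are excluded by Pre_checkOrder, the value returned here is irrelevant)
def checkOrderLoopA (pattern : List Char) : List Char → Nat → String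
  | [], _ => "false"
  | k :: rest, ptr =>
    match PySem.List.pyGet? pattern (ptr : Int) with
    | none => "false"   -- Python: IndexError (only reachable outside Pre_checkOrder)
    | some pc =>
      let ptr' := if k = pc then ptr + 1 else ptr
      if ptr' = pattern.length then "true" else checkOrderLoopA pattern rest ptr'

def checkOrder (input : String) (pattern : String) : String :=
  -- OrderedDict.fromkeys(input): keys = first occurrences of input's chars, in order
  checkOrderLoopA pattern.toList (PySem.List.dedup input.toList) 0

-- ===== PORT B =====
-- pos[c] = first index of c in input (insert only if absent)
def buildPos (xs : List Char) : PySem.Dict Char Int :=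
  (PySem.List.enumerate xs 0).foldl
    (fun d p => if d.contains p.2 then d else d.insert p.2 p.1) PySem.Dict.empty

def checkOrderLoopB (pos : PySem.Dict Char Int) : List Char → Int → String
  | [], _ => "true"
  | c :: rest, last =>
    match pos.get? c with
    | none => "false"
    | some p => if p ≤ last then "false" else checkOrderLoopB pos rest p

def checkOrder_alt (input : String) (pattern : String) : String :=
  checkOrderLoopB (buildPos input.toList) pattern.toList (-1)

-- ===== PRECONDITION & SPEC =====
-- Pre_ excludes exactly the inputs where A raises IndexError: empty pattern with non-empty input
def Pre_checkOrder (input : String) (pattern : String) : Prop := pattern ≠ "" ∨ input = ""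
instance (input : String) (pattern : String) : Decidable (Pre_checkOrder input pattern) := by unfold Pre_checkOrder; infer_instance
def pvWitness_checkOrder : String × String := ("abc", "ac")

-- On empty input with empty pattern A returns 'false' although the empty pattern is trivially in
-- order; B returns the intended 'true' there.
def D_checkOrder (input : String) (pattern : String) : Prop := input = "" ∧ pattern = ""
instance (input : String) (pattern : String) : Decidable (D_checkOrder input pattern) := by unfold D_checkOrder; infer_instance

def Spec_checkOrder (input : String) (pattern : String) (out : String) : Prop := ¬ D_checkOrder input pattern → out = checkOrder_alt input pattern
instance (input : String) (pattern : String) (out : String) : Decidable (Spec_checkOrder input pattern out) := by unfold Spec_checkOrder; infer_instance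

def pvDiffWitness_checkOrder : String × String := ("", "")
def pvDiffWitnessOut_checkOrder : String × String := ("false", "true")

-- ===== CLAIM (what is proved, stated in full; the proofs are below) =====
def Claim_unchanged_checkOrder : Prop := ∀ (input : String) (pattern : String), Dom_checkOrder input pattern → Pre_checkOrder input pattern → Spec_checkOrder input pattern (checkOrder input pattern)
def Claim_changed_checkOrder : Prop := Dom_checkOrder (pvDiffWitness_checkOrder.1) (pvDiffWitness_checkOrder.2) ∧ Pre_checkOrder (pvDiffWitness_checkOrder.1) (pvDiffWitness_checkOrder.2) ∧ D_checkOrder (pvDiffWitness_checkOrder.1) (pvDiffWitness_checkOrder.2) ∧ checkOrder (pvDiffWitness_checkOrder.1) (pvDiffWitness_checkOrder.2) = pvDiffWitnessOut_checkOrder.1 ∧ checkOrder_alt (pvDiffWitness_checkOrder.1) (pvDiffWitness_checkOrder.2) = pvDiffWitnessOut_checkOrder.2 ∧ pvDiffWitnessOut_checkOrder.1 ≠ pvDiffWitnessOut_checkOrder.2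
def Claim_exact_checkOrder : Prop := ∀ (input : String) (pattern : String), Dom_checkOrder input pattern → Pre_checkOrder input pattern → D_checkOrder input pattern → checkOrder input pattern ≠ checkOrder_alt input pattern

-- ===== LEMMAS AND PROOFS =====

-- the value the map assigns to a key (first-occurrence index; -1 as 'absent' default, unused on keys)
def pvVal (P : PySem.Dict Char Int) (k : Char) : Int := (P.get? k).getD (-1)

-- A's loop returns "true" exactly when the not-yet-matched pattern suffix is a sublist of the keys
lemma loopA_eq (pt : List Char) :
    ∀ (ks : List Char) (ptr : Nat), ptr < pt.length →
      checkOrderLoopA pt ks ptr =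
        if (pt.drop ptr).Sublist ks then "true" else "false" := by
  intro ks
  induction ks with
  | nil =>
    intro ptr h
    simp only [checkOrderLoopA]
    rw [if_neg]
    intro hsub
    have h1 := List.sublist_nil.mp hsub
    have : pt.length ≤ ptr := by rw [← List.drop_eq_nil_iff]; exact h1
    omega
  | cons k rest ih =>
    intro ptr h
    have hget : PySem.List.pyGet? pt (ptr : Int) = some pt[ptr] := by
      simp [PySem.List.pyGet?_natCast, List.getElem?_eq_getElem h]
    have hdrop : pt.drop ptr = pt[ptr] :: pt.drop (ptr + 1) :=
      List.drop_eq_getElem_cons h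
    simp only [checkOrderLoopA, hget]
    by_cases hk : k = pt[ptr]
    · simp only [if_pos hk]
      by_cases hlen : ptr + 1 = pt.length
      · rw [if_pos hlen, if_pos]
        rw [hdrop, hk]
        have h2 : pt.drop (ptr + 1) = [] := by rw [List.drop_eq_nil_iff]; omega
        rw [h2]
        exact (List.cons_sublist_cons).mpr (List.nil_sublist rest)
      · rw [if_neg hlen, ih (ptr+1) (by omega)]
        simp only [hdrop, hk, List.cons_sublist_cons]
    · simp only [if_neg hk]
      rw [if_neg (by omega), ih ptr h]
      simp only [hdrop]
      by_cases hs : (pt[ptr] :: pt.drop (ptr + 1)).Sublist rest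
      · rw [if_pos hs, if_pos (hs.trans (List.sublist_cons_self k rest))]
      · rw [if_neg hs, if_neg]
        intro hs'
        rcases List.sublist_cons_iff.mp hs' with h1 | ⟨r, hr, h2⟩
        · exact hs h1
        · exact hk (by injection hr with h3 _; exact h3.symm)


-- invariants of B's first-occurrence map, tied to the dedup key list
lemma buildPos_append (xs : List Char) (x : Char) :
    buildPos (xs ++ [x]) =
      (if (buildPos xs).contains x then buildPos xs
       else (buildPos xs).insert x ((0 : Int) + xs.length)) := by
  unfold buildPos
  rw [PySem.List.enumerate_append, List.foldl_append]
  rfl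

lemma buildPos_inv (xs : List Char) :
    (∀ c, (buildPos xs).get? c ≠ none ↔ c ∈ xs) ∧
    (∀ c p, (buildPos xs).get? c = some p → 0 ≤ p ∧ p < (xs.length : Int)) ∧
    List.Pairwise (fun a b => pvVal (buildPos xs) a < pvVal (buildPos xs) b)
      (PySem.Set.ofList xs) := by
  induction xs using List.reverseRecOn with
  | nil => refine ⟨by simp [buildPos], by simp [buildPos], by simp⟩
  | append_singleton xs x ih =>
    obtain ⟨hmem, hbnd, hpair⟩ := ih
    rw [buildPos_append]
    by_cases hx : (buildPos xs).contains x = true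
    · have hxs : x ∈ xs := by
        rw [← hmem x]
        rw [PySem.Dict.contains_eq_isSome_get?] at hx
        exact Option.isSome_iff_ne_none.mp hx
      rw [if_pos hx, PySem.Set.ofList_append_singleton,
          PySem.Set.add_of_mem (by rw [PySem.Set.mem_ofList]; exact hxs)]
      refine ⟨fun c => ?_, fun c p hp => ?_, hpair⟩
      · rw [hmem c]; simp only [List.mem_append, List.mem_singleton]
        constructor
        · exact Or.inl
        · rintro (h | rfl); exact h; exact hxs
      · have := hbnd c p hp; simp only [List.length_append]; push_cast; omega
    · have hxs : x ∉ xs := by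
        intro h; apply hx
        rw [PySem.Dict.contains_eq_isSome_get?, Option.isSome_iff_ne_none]
        exact (hmem x).mpr h
      rw [if_neg hx, PySem.Set.ofList_append_singleton,
          PySem.Set.add_of_not_mem (by rw [PySem.Set.mem_ofList]; exact hxs)]
      have hget : ∀ c, ((buildPos xs).insert x ((0:Int) + xs.length)).get? c
          = if c = x then some ((0:Int) + xs.length) else (buildPos xs).get? c :=
        fun c => PySem.Dict.get?_insert _ _ _ _
      refine ⟨fun c => ?_, fun c p hp => ?_, ?_⟩
      · rw [hget c]
        by_cases hc : c = x
        · subst hc; simp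
        · simp only [if_neg hc, hmem c, List.mem_append, List.mem_singleton]
          constructor
          · exact Or.inl
          · rintro (h | rfl); exact h; exact absurd rfl hc
      · rw [hget c] at hp
        simp only [List.length_append, List.length_singleton]
        by_cases hc : c = x
        · rw [if_pos hc] at hp
          injection hp with hp; push_cast; omega
        · rw [if_neg hc] at hp
          have := hbnd c p hp; push_cast; omega
      · rw [List.pairwise_append]
        have hval : ∀ a ∈ PySem.Set.ofList xs,
            pvVal ((buildPos xs).insert x ((0:Int) + xs.length)) a = pvVal (buildPos xs) a := by
          intro a ha
          have hax : a ≠ x := fun h => hxs (h ▸ ((PySem.Set.mem_ofList _ _).mp ha))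
          unfold pvVal; rw [hget a, if_neg hax]
        refine ⟨?_, by simp, ?_⟩
        · refine hpair.imp_of_mem ?_
          intro a b ha hb hab
          rw [hval a ha, hval b hb]; exact hab
        · intro a ha b hb
          rw [List.mem_singleton] at hb; rw [hb]
          rw [hval a ha]
          have haxs : a ∈ xs := (PySem.Set.mem_ofList _ _).mp ha
          obtain ⟨pa, hpa⟩ := Option.ne_none_iff_exists'.mp ((hmem a).mpr haxs)
          have hb2 := hbnd a pa hpa
          have : pvVal ((buildPos xs).insert x ((0:Int) + xs.length)) x = (0:Int) + xs.length := by
            unfold pvVal; rw [hget x, if_pos rfl]; rfl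
          rw [this]
          unfold pvVal; rw [hpa]; simp only [Option.getD_some]; omega


-- splitting a strictly increasing list at a matched key
-- c not in front part: peeling the head of a sublist through it
lemma cons_sublist_mid (c : Char) (rest F1 l2 : List Char) (hcF : c ∉ F1) :
    ((c :: rest).Sublist (F1 ++ c :: l2)) ↔ rest.Sublist l2 := by
  constructor
  · intro h
    induction F1 with
    | nil =>
      simp only [List.nil_append] at h
      rcases List.sublist_cons_iff.mp h with h1 | ⟨r, hr, h2⟩
      · exact ((List.sublist_cons_self c rest).trans h1)
      · injection hr with _ h3; exact h3 ▸ h2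
    | cons f F1' ih =>
      simp only [List.cons_append] at h
      rcases List.sublist_cons_iff.mp h with h1 | ⟨r, hr, h2⟩
      · exact ih (fun hm => hcF (List.mem_cons_of_mem f hm)) h1
      · injection hr with h3 _
        exact absurd (h3 ▸ List.mem_cons_self) hcF
  · intro h
    exact ((List.cons_sublist_cons).mpr h).trans (List.sublist_append_right F1 _)
lemma sublist_filter_step (val : Char → Int) (l : List Char)
    (hs : List.Pairwise (fun a b => val a < val b) l) (c : Char) (hc : c ∈ l)
    (rest : List Char) (last : Int) (hlast : last < val c) :
    ((c :: rest).Sublist (l.filter (fun k => decide (last < val k))) ↔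
      rest.Sublist (l.filter (fun k => decide (val c < val k)))) := by
  obtain ⟨l1, l2, rfl⟩ := List.append_of_mem hc
  rw [List.pairwise_append] at hs
  obtain ⟨h1, h2, h12⟩ := hs
  rw [List.pairwise_cons] at h2
  obtain ⟨hcl2, h2'⟩ := h2
  have hl1 : ∀ a ∈ l1, val a < val c := fun a ha => h12 a ha c List.mem_cons_self
  rw [List.filter_append, List.filter_append]
  have e1 : List.filter (fun k => decide (last < val k)) (c :: l2)
      = c :: l2 := by
    rw [List.filter_eq_self]
    intro a ha
    rcases List.mem_cons.mp ha with rfl | ha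
    · exact decide_eq_true hlast
    · exact decide_eq_true (lt_trans hlast (hcl2 a ha))
  have e2 : List.filter (fun k => decide (val c < val k)) (c :: l2) = l2 := by
    rw [List.filter_cons_of_neg (by simp)]
    rw [List.filter_eq_self]
    exact fun a ha => decide_eq_true (hcl2 a ha)
  have e3 : List.filter (fun k => decide (val c < val k)) l1 = [] := by
    rw [List.filter_eq_nil_iff]
    intro a ha
    simp only [decide_eq_true_eq, not_lt]
    exact le_of_lt (hl1 a ha)
  rw [e1, e2, e3, List.nil_append]
  apply cons_sublist_mid
  intro hm
  have := hl1 c (List.mem_of_mem_filter hm)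
  omega


-- B's loop is the sublist test against the still-admissible keys
lemma loopB_eq (P : PySem.Dict Char Int) (ks : List Char)
    (hmem : ∀ c, P.get? c ≠ none ↔ c ∈ ks)
    (hs : List.Pairwise (fun a b => pvVal P a < pvVal P b) ks) :
    ∀ (cs : List Char) (last : Int),
      checkOrderLoopB P cs last =
        if cs.Sublist (ks.filter (fun k => decide (last < pvVal P k))) then "true" else "false" := by
  intro cs
  induction cs with
  | nil => intro last; rw [if_pos (List.nil_sublist _)]; rfl
  | cons c rest ih =>
    intro last
    simp only [checkOrderLoopB]
    cases hg : P.get? c with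
    | none =>
      dsimp only
      rw [if_neg]
      intro hsub
      have hcm : c ∈ ks.filter (fun k => decide (last < pvVal P k)) :=
        hsub.subset List.mem_cons_self
      exact ((hmem c).mpr (List.mem_of_mem_filter hcm)) hg
    | some p =>
      dsimp only
      have hval : pvVal P c = p := by unfold pvVal; rw [hg]; rfl
      by_cases hp : p ≤ last
      · rw [if_pos hp, if_neg]
        intro hsub
        have hcm : c ∈ ks.filter (fun k => decide (last < pvVal P k)) :=
          hsub.subset List.mem_cons_self
        have := List.of_mem_filter hcm
        rw [hval] at this
        simp only [decide_eq_true_eq] at this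
        omega
      · rw [if_neg hp, ih p]
        have hck : c ∈ ks := (hmem c).mp (by rw [hg]; simp)
        have hstep := sublist_filter_step (pvVal P) ks hs c hck rest last (by rw [hval]; omega)
        rw [hval] at hstep
        simp only [hstep]


-- ===== VERDICT (by name: the statement is the Claim_ definition above) =====
theorem checkOrder_spec : Claim_unchanged_checkOrder := by
  intro input pattern _ hPre hD
  have hpt : pattern.toList ≠ [] := by
    intro h
    have hpe : pattern = "" := String.toList_eq_nil_iff.mp h
    rcases hPre with h1 | h1
    · exact h1 hpe
    · exact hD ⟨h1, hpe⟩
  obtain ⟨hmem0, hbnd, hpair⟩ := buildPos_inv input.toList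
  have hmem : ∀ c, (buildPos input.toList).get? c ≠ none ↔ c ∈ PySem.Set.ofList input.toList :=
    fun c => (hmem0 c).trans (PySem.Set.mem_ofList _ _).symm
  unfold checkOrder checkOrder_alt
  rw [PySem.List.dedup_eq_ofList,
      loopA_eq _ _ 0 (by rw [List.length_pos_iff]; exact hpt),
      loopB_eq _ _ hmem hpair pattern.toList (-1), List.drop_zero]
  have hfil : (PySem.Set.ofList input.toList).filter
      (fun k => decide ((-1 : Int) < pvVal (buildPos input.toList) k))
      = PySem.Set.ofList input.toList := by
    rw [List.filter_eq_self]
    intro a ha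
    obtain ⟨p, hp⟩ := Option.ne_none_iff_exists'.mp ((hmem a).mpr ha)
    have := hbnd a p hp
    have hv : pvVal (buildPos input.toList) a = p := by unfold pvVal; rw [hp]; rfl
    rw [hv]
    simp only [decide_eq_true_eq]
    omega
  rw [hfil]

theorem checkOrder_changed : Claim_changed_checkOrder := by
  unfold Claim_changed_checkOrder; decide

theorem checkOrder_tight : Claim_exact_checkOrder := by
  intro input pattern _ _ hD
  obtain ⟨h1, h2⟩ := hD
  subst h1; subst h2; decide
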